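-- pv_equiv track=rewrite | github.com/Marcos-Antonio1/Scripts_utilita--rios | organizador_arquivos.py | verificarDiretorioAseremCriados
-- ===== SOURCE A (Python) =====
-- def verificarDiretorioAseremCriados(listarArquivos):
--     diretorios={
--         "pdfs" : False,
--         "Imagens": False,
--         "ArquivosIsos":False,
--         "Songs": False,
--         "Documentos":False,
--         "Videos": False,
--         "Pacotes/exe":False
--     }
--     for i in listarArquivos:
--         if i.count(".pdf"):
--             diretorios["pdfs"]=True
--         elif i.count(".jpeg") or i.count(".jpg") or i.count(".png"):
--             diretorios["Imagens"]=True
--         elif i.count(".iso"):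
--             diretorios["ArquivosIsos"]=True
--         elif i.count(".doc") or i.count(".docx") or i.count(".odt") or i.count(".pttx") or i.count(".odp") or i.count(".odp"):
--             diretorios["Documentos"]=True
--         elif i.count(".mp4") or i.count(".avi") or i.count(".mkv") or i.count(".MPG"):
--               diretorios["Videos"]=True
--         elif i.count(".exe") or i.count(".deb"):
--             diretorios["Pacotes/exe"]=True
--         elif i.count(".mp3") or i.count(".WAV"):
--             diretorios["Songs"]=True
--     return diretorios;
-- ===== SOURCE B (Python) =====
-- _REGRAS = [
--     ("pdfs", (".pdf",)),
--     ("Imagens", (".jpeg", ".jpg", ".png")),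
--     ("ArquivosIsos", (".iso",)),
--     ("Documentos", (".doc", ".docx", ".odt", ".pttx", ".odp", ".odp")),
--     ("Videos", (".mp4", ".avi", ".mkv", ".MPG")),
--     ("Pacotes/exe", (".exe", ".deb")),
--     ("Songs", (".mp3", ".WAV")),
-- ]
--
-- _ORDEM = ("pdfs", "Imagens", "ArquivosIsos", "Songs",
--           "Documentos", "Videos", "Pacotes/exe")
--
--
-- def verificarDiretorioAseremCriados(listarArquivos):
--     # Sieve by category: each pass scans only the files left unmatched by all
--     # higher-priority categories (so first-match priority is preserved),
--     # records whether the category occurred and keeps the unmatched files.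
--     achou = {}
--     restantes = list(listarArquivos)
--     for cat, exts in _REGRAS:
--         encontrou = False
--         proximos = []
--         for f in restantes:
--             if any(e in f for e in exts):
--                 encontrou = True
--             else:
--                 proximos.append(f)
--         achou[cat] = encontrou
--         restantes = proximos
--     return {cat: achou[cat] for cat in _ORDEM}
-- ===== Notes on version B (the rewrite author's own statement) =====
-- stated objective: alternative
-- what changed: B inverts the loop structure: instead of A's single pass over the files with a 7-branch elif chain mutating a flags dict, B sieves the file list category by category in priority order - seven staged passes, each scanning only the files left unmatched by higher-priority categories, recording whether the category occurred and keeping the unmatched files for the next pass.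
import Mathlib
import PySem

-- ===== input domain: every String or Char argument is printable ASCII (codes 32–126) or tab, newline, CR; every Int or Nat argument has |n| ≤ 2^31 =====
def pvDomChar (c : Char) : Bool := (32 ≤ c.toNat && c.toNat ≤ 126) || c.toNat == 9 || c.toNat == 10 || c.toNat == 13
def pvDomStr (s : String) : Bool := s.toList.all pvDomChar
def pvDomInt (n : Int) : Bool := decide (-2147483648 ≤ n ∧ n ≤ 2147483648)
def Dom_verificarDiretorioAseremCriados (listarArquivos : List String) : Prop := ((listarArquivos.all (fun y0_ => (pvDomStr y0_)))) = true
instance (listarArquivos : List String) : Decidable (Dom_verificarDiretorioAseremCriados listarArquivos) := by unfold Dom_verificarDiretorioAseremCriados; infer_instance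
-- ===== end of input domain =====

-- B replaces A's single pass over files (elif chain mutating a flags dict) by a category-by-category
-- sieve: seven staged passes over a shrinking file list; alternative structure, same cost.


-- ===== PORT A =====
def pvInitA : PySem.Dict String Bool :=
  PySem.Dict.ofList [("pdfs", false), ("Imagens", false), ("ArquivosIsos", false),
    ("Songs", false), ("Documentos", false), ("Videos", false), ("Pacotes/exe", false)]

def pvStepA (d : PySem.Dict String Bool) (i : String) : PySem.Dict String Bool :=
  if PySem.Str.count i ".pdf" ≠ 0 then d.insert "pdfs" true
  else if PySem.Str.count i ".jpeg" ≠ 0 ∨ PySem.Str.count i ".jpg" ≠ 0 ∨ PySem.Str.count i ".png" ≠ 0 then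
    d.insert "Imagens" true
  else if PySem.Str.count i ".iso" ≠ 0 then d.insert "ArquivosIsos" true
  else if PySem.Str.count i ".doc" ≠ 0 ∨ PySem.Str.count i ".docx" ≠ 0 ∨ PySem.Str.count i ".odt" ≠ 0 ∨
          PySem.Str.count i ".pttx" ≠ 0 ∨ PySem.Str.count i ".odp" ≠ 0 ∨ PySem.Str.count i ".odp" ≠ 0 then
    d.insert "Documentos" true
  else if PySem.Str.count i ".mp4" ≠ 0 ∨ PySem.Str.count i ".avi" ≠ 0 ∨ PySem.Str.count i ".mkv" ≠ 0 ∨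
          PySem.Str.count i ".MPG" ≠ 0 then
    d.insert "Videos" true
  else if PySem.Str.count i ".exe" ≠ 0 ∨ PySem.Str.count i ".deb" ≠ 0 then d.insert "Pacotes/exe" true
  else if PySem.Str.count i ".mp3" ≠ 0 ∨ PySem.Str.count i ".WAV" ≠ 0 then d.insert "Songs" true
  else d

def verificarDiretorioAseremCriados (listarArquivos : List String) : List (String × Bool) :=
  (listarArquivos.foldl pvStepA pvInitA).items

-- ===== PORT B =====
-- rule table (priority order), match = any extension is a substring
def pvRegras : List (String × List String) :=
  [("pdfs", [".pdf"]),
   ("Imagens", [".jpeg", ".jpg", ".png"]),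
   ("ArquivosIsos", [".iso"]),
   ("Documentos", [".doc", ".docx", ".odt", ".pttx", ".odp", ".odp"]),
   ("Videos", [".mp4", ".avi", ".mkv", ".MPG"]),
   ("Pacotes/exe", [".exe", ".deb"]),
   ("Songs", [".mp3", ".WAV"])]

def pvMatch (exts : List String) (f : String) : Bool := exts.any (fun e => PySem.Str.isIn e f)

-- one sieve pass: state (encontrou, proximos); a matching file sets the flag, others are kept
def pvPasso (exts : List String) (st : Bool × List String) (f : String) : Bool × List String :=
  if pvMatch exts f then (true, st.2) else (st.1, st.2 ++ [f])

-- the sieve loop: for each rule, one pass over the remaining files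
def verificarDiretorioAseremCriados_alt (listarArquivos : List String) : List (String × Bool) :=
  let fin := pvRegras.foldl
    (fun (st : PySem.Dict String Bool × List String) r =>
      let p := st.2.foldl (pvPasso r.2) (false, [])
      (st.1.insert r.1 p.1, p.2))
    (PySem.Dict.ofList [], listarArquivos)
  ["pdfs", "Imagens", "ArquivosIsos", "Songs", "Documentos", "Videos", "Pacotes/exe"].map
    (fun k => (k, fin.1.getD k false))

-- ===== PRECONDITION & SPEC =====
def Spec_verificarDiretorioAseremCriados (listarArquivos : List String) (out : List (String × Bool)) : Prop := out = verificarDiretorioAseremCriados_alt listarArquivos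
instance (listarArquivos : List String) (out : List (String × Bool)) : Decidable (Spec_verificarDiretorioAseremCriados listarArquivos out) := by unfold Spec_verificarDiretorioAseremCriados; infer_instance

-- ===== CLAIM (what is proved, stated in full; the proofs are below) =====
def Claim_equal_verificarDiretorioAseremCriados : Prop := ∀ (listarArquivos : List String), Dom_verificarDiretorioAseremCriados listarArquivos → Spec_verificarDiretorioAseremCriados listarArquivos (verificarDiretorioAseremCriados listarArquivos)

-- ===== LEMMAS AND PROOFS =====

-- A's first-match category of a file (proof helper characterising A's elif chain)
def pvCategoria (nome : String) : Option String :=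
  (pvRegras.find? (fun r => pvMatch r.2 nome)).map Prod.fst

-- the dict state of A's loop: all seven keys, in insertion order
def pvD (b1 b2 b3 b4 b5 b6 b7 : Bool) : PySem.Dict String Bool :=
  ⟨[("pdfs", b1), ("Imagens", b2), ("ArquivosIsos", b3), ("Songs", b4),
    ("Documentos", b5), ("Videos", b6), ("Pacotes/exe", b7)]⟩

theorem pv_go_le (sub : List Char) : ∀ (fuel : ℕ) (l : List Char) (acc : ℕ),
    acc ≤ PySem.Chars.count.go sub fuel l acc := by
  intro fuel
  induction fuel with
  | zero => intro l acc; simp [PySem.Chars.count.go]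
  | succ n ih =>
    intro l acc
    cases l with
    | nil => simp [PySem.Chars.count.go]
    | cons h t =>
      rw [PySem.Chars.count.go]
      split
      · exact le_trans (Nat.le_succ acc) (ih _ _)
      · exact ih _ _

theorem pv_go_eq_iff (sub : List Char) (hs : sub ≠ []) : ∀ (fuel : ℕ) (l : List Char) (acc : ℕ),
    l.length ≤ fuel → (PySem.Chars.count.go sub fuel l acc = acc ↔ ¬ sub <:+: l) := by
  intro fuel
  induction fuel with
  | zero =>
    intro l acc hl
    have : l = [] := List.length_eq_zero_iff.mp (Nat.le_zero.mp hl)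
    subst this
    simp [PySem.Chars.count.go, List.infix_nil, hs]
  | succ n ih =>
    intro l acc hl
    cases l with
    | nil => simp [PySem.Chars.count.go, List.infix_nil, hs]
    | cons h t =>
      rw [PySem.Chars.count.go]
      split
      · rename_i hpre
        have hinf : sub <:+: h :: t :=
          (List.isPrefixOf_iff_prefix.mp hpre).isInfix
        have hlt : acc < PySem.Chars.count.go sub n (List.drop sub.length (h :: t)) (acc + 1) :=
          lt_of_lt_of_le (Nat.lt_succ_self acc) (pv_go_le _ _ _ _)
        constructor
        · intro he; omega
        · intro hni; exact absurd hinf hni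
      · rename_i hpre
        have hnp : ¬ sub <+: h :: t := fun hp => hpre (List.isPrefixOf_iff_prefix.mpr hp)
        rw [ih t acc (by simpa using Nat.lt_succ_iff.mp (Nat.lt_succ_of_le hl))]
        rw [List.infix_cons_iff]
        tauto

theorem pv_count_ne_iff (s e : String) (he : e.toList ≠ []) :
    (PySem.Str.count s e ≠ 0) ↔ PySem.Str.isIn e s = true := by
  rw [PySem.Str.isIn_iff_infix, PySem.Str.count_eq]
  unfold PySem.Chars.count
  rw [if_neg (by simpa [List.isEmpty_iff] using he)]
  have h := pv_go_eq_iff e.toList he s.toList.length s.toList 0 (le_refl _)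
  constructor
  · intro hne
    by_contra hni
    exact hne (h.mpr hni)
  · intro hinf hz
    exact (h.mp hz) hinf

theorem pv_isIn_true (s e : String) (he : e.toList ≠ []) (h : PySem.Str.count s e ≠ 0) :
    PySem.Str.isIn e s = true := (pv_count_ne_iff s e he).mp h

theorem pv_isIn_false (s e : String) (he : e.toList ≠ []) (h : ¬ PySem.Str.count s e ≠ 0) :
    PySem.Str.isIn e s = false := by
  rw [← Bool.not_eq_true]
  exact fun hh => h ((pv_count_ne_iff s e he).mpr hh)

set_option maxHeartbeats 1600000 in
theorem pvStep_eq (i : String) (b1 b2 b3 b4 b5 b6 b7 : Bool) :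
    pvStepA (pvD b1 b2 b3 b4 b5 b6 b7) i =
    pvD (b1 || (pvCategoria i == some "pdfs")) (b2 || (pvCategoria i == some "Imagens"))
        (b3 || (pvCategoria i == some "ArquivosIsos")) (b4 || (pvCategoria i == some "Songs"))
        (b5 || (pvCategoria i == some "Documentos")) (b6 || (pvCategoria i == some "Videos"))
        (b7 || (pvCategoria i == some "Pacotes/exe")) := by
  unfold pvStepA
  split_ifs with h1 h2 h3 h4 h5 h6 h7
  · -- branch 1
    have p := pv_isIn_true i ".pdf" (by decide) h1
    simp at p
    simp [pvCategoria, pvRegras, pvMatch, pvD, PySem.Dict.insert, PySem.Dict.contains, p]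
  · -- branch 2
    have n1 := pv_isIn_false i ".pdf" (by decide) h1
    simp at n1
    rcases h2 with h | h | h <;>
      [have p := pv_isIn_true i ".jpeg" (by decide) h;
       have p := pv_isIn_true i ".jpg" (by decide) h;
       have p := pv_isIn_true i ".png" (by decide) h] <;>
    simp at p <;>
    simp [pvCategoria, pvRegras, pvMatch, pvD, PySem.Dict.insert, PySem.Dict.contains, p, n1]
  · -- branch 3
    have n1 := pv_isIn_false i ".pdf" (by decide) h1
    rw [not_or, not_or] at h2
    have n2a := pv_isIn_false i ".jpeg" (by decide) h2.1
    have n2b := pv_isIn_false i ".jpg" (by decide) h2.2.1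
    have n2c := pv_isIn_false i ".png" (by decide) h2.2.2
    simp at n1 n2a n2b n2c
    have p := pv_isIn_true i ".iso" (by decide) h3
    simp at p
    simp [pvCategoria, pvRegras, pvMatch, pvD, PySem.Dict.insert, PySem.Dict.contains, p, n1, n2a, n2b, n2c]
  · -- branch 4
    have n1 := pv_isIn_false i ".pdf" (by decide) h1
    rw [not_or, not_or] at h2
    have n2a := pv_isIn_false i ".jpeg" (by decide) h2.1
    have n2b := pv_isIn_false i ".jpg" (by decide) h2.2.1
    have n2c := pv_isIn_false i ".png" (by decide) h2.2.2
    have n3 := pv_isIn_false i ".iso" (by decide) h3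
    simp at n1 n2a n2b n2c n3
    rcases h4 with h | h | h | h | h | h <;>
      [have p := pv_isIn_true i ".doc" (by decide) h;
       have p := pv_isIn_true i ".docx" (by decide) h;
       have p := pv_isIn_true i ".odt" (by decide) h;
       have p := pv_isIn_true i ".pttx" (by decide) h;
       have p := pv_isIn_true i ".odp" (by decide) h;
       have p := pv_isIn_true i ".odp" (by decide) h] <;>
    simp at p <;>
    simp [pvCategoria, pvRegras, pvMatch, pvD, PySem.Dict.insert, PySem.Dict.contains, p, n1, n2a, n2b, n2c, n3]
  · -- branch 5
    have n1 := pv_isIn_false i ".pdf" (by decide) h1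
    rw [not_or, not_or] at h2
    have n2a := pv_isIn_false i ".jpeg" (by decide) h2.1
    have n2b := pv_isIn_false i ".jpg" (by decide) h2.2.1
    have n2c := pv_isIn_false i ".png" (by decide) h2.2.2
    have n3 := pv_isIn_false i ".iso" (by decide) h3
    rw [not_or, not_or, not_or, not_or, not_or] at h4
    have n4a := pv_isIn_false i ".doc" (by decide) h4.1
    have n4b := pv_isIn_false i ".docx" (by decide) h4.2.1
    have n4c := pv_isIn_false i ".odt" (by decide) h4.2.2.1
    have n4d := pv_isIn_false i ".pttx" (by decide) h4.2.2.2.1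
    have n4e := pv_isIn_false i ".odp" (by decide) h4.2.2.2.2.1
    simp at n1 n2a n2b n2c n3 n4a n4b n4c n4d n4e
    rcases h5 with h | h | h | h <;>
      [have p := pv_isIn_true i ".mp4" (by decide) h;
       have p := pv_isIn_true i ".avi" (by decide) h;
       have p := pv_isIn_true i ".mkv" (by decide) h;
       have p := pv_isIn_true i ".MPG" (by decide) h] <;>
    simp at p <;>
    simp [pvCategoria, pvRegras, pvMatch, pvD, PySem.Dict.insert, PySem.Dict.contains, p, n1, n2a, n2b, n2c, n3, n4a, n4b, n4c, n4d, n4e]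
  · -- branch 6
    have n1 := pv_isIn_false i ".pdf" (by decide) h1
    rw [not_or, not_or] at h2
    have n2a := pv_isIn_false i ".jpeg" (by decide) h2.1
    have n2b := pv_isIn_false i ".jpg" (by decide) h2.2.1
    have n2c := pv_isIn_false i ".png" (by decide) h2.2.2
    have n3 := pv_isIn_false i ".iso" (by decide) h3
    rw [not_or, not_or, not_or, not_or, not_or] at h4
    have n4a := pv_isIn_false i ".doc" (by decide) h4.1
    have n4b := pv_isIn_false i ".docx" (by decide) h4.2.1
    have n4c := pv_isIn_false i ".odt" (by decide) h4.2.2.1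
    have n4d := pv_isIn_false i ".pttx" (by decide) h4.2.2.2.1
    have n4e := pv_isIn_false i ".odp" (by decide) h4.2.2.2.2.1
    rw [not_or, not_or, not_or] at h5
    have n5a := pv_isIn_false i ".mp4" (by decide) h5.1
    have n5b := pv_isIn_false i ".avi" (by decide) h5.2.1
    have n5c := pv_isIn_false i ".mkv" (by decide) h5.2.2.1
    have n5d := pv_isIn_false i ".MPG" (by decide) h5.2.2.2
    simp at n1 n2a n2b n2c n3 n4a n4b n4c n4d n4e n5a n5b n5c n5d
    rcases h6 with h | h <;>
      [have p := pv_isIn_true i ".exe" (by decide) h;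
       have p := pv_isIn_true i ".deb" (by decide) h] <;>
    simp at p <;>
    simp [pvCategoria, pvRegras, pvMatch, pvD, PySem.Dict.insert, PySem.Dict.contains, p, n1, n2a, n2b, n2c, n3, n4a, n4b, n4c, n4d, n4e, n5a, n5b, n5c, n5d]
  · -- branch 7
    have n1 := pv_isIn_false i ".pdf" (by decide) h1
    rw [not_or, not_or] at h2
    have n2a := pv_isIn_false i ".jpeg" (by decide) h2.1
    have n2b := pv_isIn_false i ".jpg" (by decide) h2.2.1
    have n2c := pv_isIn_false i ".png" (by decide) h2.2.2
    have n3 := pv_isIn_false i ".iso" (by decide) h3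
    rw [not_or, not_or, not_or, not_or, not_or] at h4
    have n4a := pv_isIn_false i ".doc" (by decide) h4.1
    have n4b := pv_isIn_false i ".docx" (by decide) h4.2.1
    have n4c := pv_isIn_false i ".odt" (by decide) h4.2.2.1
    have n4d := pv_isIn_false i ".pttx" (by decide) h4.2.2.2.1
    have n4e := pv_isIn_false i ".odp" (by decide) h4.2.2.2.2.1
    rw [not_or, not_or, not_or] at h5
    have n5a := pv_isIn_false i ".mp4" (by decide) h5.1
    have n5b := pv_isIn_false i ".avi" (by decide) h5.2.1
    have n5c := pv_isIn_false i ".mkv" (by decide) h5.2.2.1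
    have n5d := pv_isIn_false i ".MPG" (by decide) h5.2.2.2
    rw [not_or] at h6
    have n6a := pv_isIn_false i ".exe" (by decide) h6.1
    have n6b := pv_isIn_false i ".deb" (by decide) h6.2
    simp at n1 n2a n2b n2c n3 n4a n4b n4c n4d n4e n5a n5b n5c n5d n6a n6b
    rcases h7 with h | h <;>
      [have p := pv_isIn_true i ".mp3" (by decide) h;
       have p := pv_isIn_true i ".WAV" (by decide) h] <;>
    simp at p <;>
    simp [pvCategoria, pvRegras, pvMatch, pvD, PySem.Dict.insert, PySem.Dict.contains, p, n1, n2a, n2b, n2c, n3, n4a, n4b, n4c, n4d, n4e, n5a, n5b, n5c, n5d, n6a, n6b]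
  · -- branch 8
    have n1 := pv_isIn_false i ".pdf" (by decide) h1
    rw [not_or, not_or] at h2
    have n2a := pv_isIn_false i ".jpeg" (by decide) h2.1
    have n2b := pv_isIn_false i ".jpg" (by decide) h2.2.1
    have n2c := pv_isIn_false i ".png" (by decide) h2.2.2
    have n3 := pv_isIn_false i ".iso" (by decide) h3
    rw [not_or, not_or, not_or, not_or, not_or] at h4
    have n4a := pv_isIn_false i ".doc" (by decide) h4.1
    have n4b := pv_isIn_false i ".docx" (by decide) h4.2.1
    have n4c := pv_isIn_false i ".odt" (by decide) h4.2.2.1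
    have n4d := pv_isIn_false i ".pttx" (by decide) h4.2.2.2.1
    have n4e := pv_isIn_false i ".odp" (by decide) h4.2.2.2.2.1
    rw [not_or, not_or, not_or] at h5
    have n5a := pv_isIn_false i ".mp4" (by decide) h5.1
    have n5b := pv_isIn_false i ".avi" (by decide) h5.2.1
    have n5c := pv_isIn_false i ".mkv" (by decide) h5.2.2.1
    have n5d := pv_isIn_false i ".MPG" (by decide) h5.2.2.2
    rw [not_or] at h6
    have n6a := pv_isIn_false i ".exe" (by decide) h6.1
    have n6b := pv_isIn_false i ".deb" (by decide) h6.2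
    rw [not_or] at h7
    have n7a := pv_isIn_false i ".mp3" (by decide) h7.1
    have n7b := pv_isIn_false i ".WAV" (by decide) h7.2
    simp at n1 n2a n2b n2c n3 n4a n4b n4c n4d n4e n5a n5b n5c n5d n6a n6b n7a n7b
    simp [pvCategoria, pvRegras, pvMatch, pvD, n1, n2a, n2b, n2c, n3, n4a, n4b, n4c, n4d, n4e, n5a, n5b, n5c, n5d, n6a, n6b, n7a, n7b]

theorem pv_fold (l : List String) : ∀ (b1 b2 b3 b4 b5 b6 b7 : Bool),
    l.foldl pvStepA (pvD b1 b2 b3 b4 b5 b6 b7) =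
    pvD (b1 || l.any (fun i => pvCategoria i == some "pdfs"))
        (b2 || l.any (fun i => pvCategoria i == some "Imagens"))
        (b3 || l.any (fun i => pvCategoria i == some "ArquivosIsos"))
        (b4 || l.any (fun i => pvCategoria i == some "Songs"))
        (b5 || l.any (fun i => pvCategoria i == some "Documentos"))
        (b6 || l.any (fun i => pvCategoria i == some "Videos"))
        (b7 || l.any (fun i => pvCategoria i == some "Pacotes/exe")) := by
  induction l with
  | nil => intro b1 b2 b3 b4 b5 b6 b7; simp
  | cons x t ih =>
    intro b1 b2 b3 b4 b5 b6 b7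
    rw [List.foldl_cons, pvStep_eq, ih]
    simp [Bool.or_assoc]

-- pvCategoria as a Boolean test for each category, pointwise
theorem pv_cat_point (i : String) :
    ((pvCategoria i == some "pdfs") = pvMatch [".pdf"] i) ∧
    ((pvCategoria i == some "Imagens") = (!pvMatch [".pdf"] i && pvMatch [".jpeg", ".jpg", ".png"] i)) ∧
    ((pvCategoria i == some "ArquivosIsos") = (!pvMatch [".pdf"] i && (!pvMatch [".jpeg", ".jpg", ".png"] i && pvMatch [".iso"] i))) ∧
    ((pvCategoria i == some "Documentos") = (!pvMatch [".pdf"] i && (!pvMatch [".jpeg", ".jpg", ".png"] i && (!pvMatch [".iso"] i && pvMatch [".doc", ".docx", ".odt", ".pttx", ".odp", ".odp"] i)))) ∧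
    ((pvCategoria i == some "Videos") = (!pvMatch [".pdf"] i && (!pvMatch [".jpeg", ".jpg", ".png"] i && (!pvMatch [".iso"] i && (!pvMatch [".doc", ".docx", ".odt", ".pttx", ".odp", ".odp"] i && pvMatch [".mp4", ".avi", ".mkv", ".MPG"] i))))) ∧
    ((pvCategoria i == some "Pacotes/exe") = (!pvMatch [".pdf"] i && (!pvMatch [".jpeg", ".jpg", ".png"] i && (!pvMatch [".iso"] i && (!pvMatch [".doc", ".docx", ".odt", ".pttx", ".odp", ".odp"] i && (!pvMatch [".mp4", ".avi", ".mkv", ".MPG"] i && pvMatch [".exe", ".deb"] i)))))) ∧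
    ((pvCategoria i == some "Songs") = (!pvMatch [".pdf"] i && (!pvMatch [".jpeg", ".jpg", ".png"] i && (!pvMatch [".iso"] i && (!pvMatch [".doc", ".docx", ".odt", ".pttx", ".odp", ".odp"] i && (!pvMatch [".mp4", ".avi", ".mkv", ".MPG"] i && (!pvMatch [".exe", ".deb"] i && pvMatch [".mp3", ".WAV"] i))))))) := by
  cases m1 : pvMatch [".pdf"] i <;>
  cases m2 : pvMatch [".jpeg", ".jpg", ".png"] i <;>
  cases m3 : pvMatch [".iso"] i <;>
  cases m4 : pvMatch [".doc", ".docx", ".odt", ".pttx", ".odp", ".odp"] i <;>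
  cases m5 : pvMatch [".mp4", ".avi", ".mkv", ".MPG"] i <;>
  cases m6 : pvMatch [".exe", ".deb"] i <;>
  cases m7 : pvMatch [".mp3", ".WAV"] i <;>
  simp [pvCategoria, pvRegras, List.find?, m1, m2, m3, m4, m5, m6, m7]

-- ===== VERDICT (by name: the statement is the Claim_ definition above) =====
theorem pv_any_ext {a : Type} (l : List a) (f g : a → Bool) (h : ∀ i, f i = g i) :
    l.any f = l.any g := by
  have hfg : f = g := funext h
  rw [hfg]

theorem pv_passo_spec (exts : List String) (l : List String) : ∀ (b : Bool) (acc : List String),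
    l.foldl (pvPasso exts) (b, acc) =
    (b || l.any (pvMatch exts), acc ++ l.filter (fun f => !(pvMatch exts f))) := by
  induction l with
  | nil => intro b acc; simp
  | cons x t ih =>
    intro b acc
    cases h : pvMatch exts x <;> simp [pvPasso, h, ih]

set_option maxHeartbeats 1600000 in
theorem pv_alt_eq (l : List String) :
    verificarDiretorioAseremCriados_alt l =
    [("pdfs", l.any (pvMatch [".pdf"])),
     ("Imagens", (l.filter (fun f => !(pvMatch [".pdf"] f))).any (pvMatch [".jpeg", ".jpg", ".png"])),
     ("ArquivosIsos", ((l.filter (fun f => !(pvMatch [".pdf"] f))).filter (fun f => !(pvMatch [".jpeg", ".jpg", ".png"] f))).any (pvMatch [".iso"])),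
     ("Songs", ((((((l.filter (fun f => !(pvMatch [".pdf"] f))).filter (fun f => !(pvMatch [".jpeg", ".jpg", ".png"] f))).filter (fun f => !(pvMatch [".iso"] f))).filter (fun f => !(pvMatch [".doc", ".docx", ".odt", ".pttx", ".odp", ".odp"] f))).filter (fun f => !(pvMatch [".mp4", ".avi", ".mkv", ".MPG"] f))).filter (fun f => !(pvMatch [".exe", ".deb"] f))).any (pvMatch [".mp3", ".WAV"])),
     ("Documentos", (((l.filter (fun f => !(pvMatch [".pdf"] f))).filter (fun f => !(pvMatch [".jpeg", ".jpg", ".png"] f))).filter (fun f => !(pvMatch [".iso"] f))).any (pvMatch [".doc", ".docx", ".odt", ".pttx", ".odp", ".odp"])),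
     ("Videos", ((((l.filter (fun f => !(pvMatch [".pdf"] f))).filter (fun f => !(pvMatch [".jpeg", ".jpg", ".png"] f))).filter (fun f => !(pvMatch [".iso"] f))).filter (fun f => !(pvMatch [".doc", ".docx", ".odt", ".pttx", ".odp", ".odp"] f))).any (pvMatch [".mp4", ".avi", ".mkv", ".MPG"])),
     ("Pacotes/exe", (((((l.filter (fun f => !(pvMatch [".pdf"] f))).filter (fun f => !(pvMatch [".jpeg", ".jpg", ".png"] f))).filter (fun f => !(pvMatch [".iso"] f))).filter (fun f => !(pvMatch [".doc", ".docx", ".odt", ".pttx", ".odp", ".odp"] f))).filter (fun f => !(pvMatch [".mp4", ".avi", ".mkv", ".MPG"] f))).any (pvMatch [".exe", ".deb"]))] := by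
  unfold verificarDiretorioAseremCriados_alt
  simp only [pvRegras, List.foldl_cons, List.foldl_nil, pv_passo_spec,
    Bool.false_or, List.nil_append]
  rfl

set_option maxHeartbeats 1600000 in
theorem verificarDiretorioAseremCriados_spec : Claim_equal_verificarDiretorioAseremCriados := by
  intro l _
  unfold Spec_verificarDiretorioAseremCriados verificarDiretorioAseremCriados
  have hinit : pvInitA = pvD false false false false false false false := by decide
  rw [hinit, pv_fold, pv_alt_eq]
  simp only [pvD, Bool.false_or, List.cons.injEq, Prod.mk.injEq, and_true]
  and_intros <;> (try simp only [List.any_filter, List.filter_filter]) <;>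
    first
      | rfl
      | · apply pv_any_ext
          intro i
          obtain ⟨e1, e2, e3, e4, e5, e6, e7⟩ := pv_cat_point i
          simp only [e1, e2, e3, e4, e5, e6, e7]
          try cases pvMatch [".pdf"] i <;>
          cases pvMatch [".jpeg", ".jpg", ".png"] i <;>
          cases pvMatch [".iso"] i <;>
          cases pvMatch [".doc", ".docx", ".odt", ".pttx", ".odp", ".odp"] i <;>
          cases pvMatch [".mp4", ".avi", ".mkv", ".MPG"] i <;>
          cases pvMatch [".exe", ".deb"] i <;>
          cases pvMatch [".mp3", ".WAV"] i <;> rfl
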